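-- pv_equiv track=rewrite | github.com/blzzua/codewars | 7-kyu/single_character_palindromes_ii.py | solve
-- ===== SOURCE A (Python) =====
-- def solve(s):
--     ln_odd = len(s) % 2
--     if s == s[::-1]:
--         return bool(ln_odd)
--     else:
--         half = len(s)//2
--         w1 = s[:half]
--         w2 = s[-half:][::-1]
--         sum_diff = sum(a != b for a,b in zip(w1, w2))
--         if ln_odd:
--             return sum_diff < 2
--         else:
--             return sum_diff == 1
-- ===== SOURCE B (Python) =====
-- def solve(s):
--     i, j = 0, len(s) - 1
--     while i < j and s[i] == s[j]:
--         i += 1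
--         j -= 1
--     if i >= j:
--         # already a palindrome: only an odd length has a middle char we may change
--         return len(s) % 2 == 1
--     # skip the one mismatched pair (change one of its chars) and
--     # require the rest to be an exact palindrome
--     i += 1
--     j -= 1
--     while i < j:
--         if s[i] != s[j]:
--             return False
--         i += 1
--         j -= 1
--     return True
-- ===== Notes on version B (the rewrite author's own statement) =====
-- stated objective: alternative
-- what changed: Early-exit two-pointer scan: walk i,j inward to the first mismatched outer pair, skip that pair, and require the remainder to mirror exactly; replaces A's whole-string reversal check and its full mismatch-summing zip pass (no reversal, no count, no parity-dependent thresholds on a sum).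
import Mathlib
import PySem

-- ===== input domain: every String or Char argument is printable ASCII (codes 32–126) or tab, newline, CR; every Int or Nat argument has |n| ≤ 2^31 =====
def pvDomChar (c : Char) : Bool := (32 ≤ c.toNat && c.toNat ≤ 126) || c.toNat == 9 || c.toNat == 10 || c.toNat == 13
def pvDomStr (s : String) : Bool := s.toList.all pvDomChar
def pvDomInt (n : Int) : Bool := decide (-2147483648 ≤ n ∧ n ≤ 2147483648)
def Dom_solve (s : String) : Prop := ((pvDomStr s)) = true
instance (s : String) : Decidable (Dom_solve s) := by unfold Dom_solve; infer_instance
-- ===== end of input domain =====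

-- B replaces A's reversal check and mismatch-summing pass by an early-exit two-pointer
-- scan: find the first mismatched outer pair, skip it, require the rest to mirror exactly
-- (objective: alternative).

-- ===== PORT A =====
-- s[::-1] is PySem.List.slice? … (-1); step -1 never raises, so .getD [] is never taken.
def solve (s : String) : Bool :=
  let cs := s.toList
  let lnOdd := cs.length % 2                                  -- ln_odd = len(s) % 2
  if cs = (PySem.List.slice? cs none none (-1)).getD [] then  -- if s == s[::-1]
    decide (lnOdd ≠ 0)                                        --   return bool(ln_odd)
  else
    let half := cs.length / 2                                 -- half = len(s)//2 (len ≥ 0)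
    let w1 := PySem.List.slice cs none (some (half : Int))    -- w1 = s[:half]
    let w2 := (PySem.List.slice? (PySem.List.slice cs (some (-(half : Int))) none)
                none none (-1)).getD []                       -- w2 = s[-half:][::-1]
    let sumDiff := (w1.zip w2).foldl
        (fun acc ab => acc + (if ab.1 ≠ ab.2 then 1 else 0)) (0 : Nat)  -- sum(a != b for a,b in zip(w1,w2))
    if lnOdd ≠ 0 then decide (sumDiff < 2) else decide (sumDiff = 1)

-- ===== PORT B =====
-- first while loop: advance i,j while i < j and s[i] == s[j] (indices stay in range,
-- so pyGet? is the exact s[i])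
def solveAltScan (cs : List Char) (i j : Int) : Int × Int :=
  if h : i < j ∧ PySem.List.pyGet? cs i = PySem.List.pyGet? cs j then
    solveAltScan cs (i + 1) (j - 1)
  else (i, j)
termination_by (j - i).toNat
decreasing_by omega

-- second while loop: return False on any further mismatch, True when the pointers meet
def solveAltCheck (cs : List Char) (i j : Int) : Bool :=
  if h : i < j then
    if PySem.List.pyGet? cs i ≠ PySem.List.pyGet? cs j then false
    else solveAltCheck cs (i + 1) (j - 1)
  else true
termination_by (j - i).toNat
decreasing_by omega

def solve_alt (s : String) : Bool :=
  let cs := s.toList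
  let ij := solveAltScan cs 0 ((cs.length : Int) - 1)   -- i, j = 0, len(s) - 1; first loop
  if ij.2 ≤ ij.1 then decide (cs.length % 2 = 1)        -- if i >= j: return len(s) % 2 == 1
  else solveAltCheck cs (ij.1 + 1) (ij.2 - 1)           -- i += 1; j -= 1; second loop

-- ===== PRECONDITION & SPEC =====
def Spec_solve (s : String) (out : Bool) : Prop := out = solve_alt s
instance (s : String) (out : Bool) : Decidable (Spec_solve s out) := by unfold Spec_solve; infer_instance

-- ===== CLAIM (what is proved, stated in full; the proofs are below) =====
def Claim_equal_solve : Prop := ∀ (s : String), Dom_solve s → Spec_solve s (solve s)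

-- ===== LEMMAS AND PROOFS =====

-- number of mismatched mirrored pairs; the canonical value both ports are reduced to
def mismatchCount (cs : List Char) : Nat :=
  (List.range (cs.length / 2)).countP (fun k => decide (cs[k]? ≠ cs[cs.length - 1 - k]?))

def canonSolve (cs : List Char) : Bool :=
  if mismatchCount cs = 0 then decide (cs.length % 2 = 1) else decide (mismatchCount cs = 1)

-- a 0/1-adding foldl is countP
theorem foldl_indicator {α : Type} (p : α → Prop) [DecidablePred p] (l : List α) (k : Nat) :
    l.foldl (fun acc x => acc + (if p x then 1 else 0)) k = k + l.countP (fun x => decide (p x)) := by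
  induction l generalizing k with
  | nil => simp
  | cons a t ih => by_cases h : p a <;> simp [h, ih] <;> omega

-- A's zipped half-pairs, elementwise, are the mirrored index pairs
theorem zip_halves_eq_map (cs : List Char) :
    (cs.take (cs.length / 2)).zip ((cs.drop (cs.length - cs.length / 2)).reverse)
      = (List.range (cs.length / 2)).map
          (fun i => ((cs[i]?).getD 'x', (cs[cs.length - 1 - i]?).getD 'x')) := by
  apply List.ext_getElem
  · simp; omega
  · intro i h1 h2
    have hn : cs.length / 2 ≤ cs.length := Nat.div_le_self _ _
    have hi : i < cs.length / 2 := by simpa using h2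
    have hi1 : i < cs.length := by omega
    have hi2 : cs.length - 1 - i < cs.length := by omega
    simp [List.getElem_zip, List.getElem_take, List.getElem_reverse, List.getElem_drop,
          hi1, hi2]
    congr 1
    omega

-- the mismatch predicates agree on indices below n/2
theorem countP_pairs_eq (cs : List Char) :
    ((List.range (cs.length / 2)).map
        (fun i => ((cs[i]?).getD 'x', (cs[cs.length - 1 - i]?).getD 'x'))).countP
        (fun ab => decide (ab.1 ≠ ab.2))
      = mismatchCount cs := by
  unfold mismatchCount
  rw [List.countP_map]
  apply List.countP_congr
  intro i hmem
  have hi : i < cs.length / 2 := by simpa using hmem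
  have hn : cs.length / 2 ≤ cs.length := Nat.div_le_self _ _
  have hi1 : i < cs.length := by omega
  have hi2 : cs.length - 1 - i < cs.length := by omega
  simp [hi1, hi2, Function.comp]

-- palindrome iff zero mismatched mirrored pairs
theorem palindrome_iff_count_zero (cs : List Char) :
    cs = cs.reverse ↔ mismatchCount cs = 0 := by
  unfold mismatchCount
  rw [List.countP_eq_zero]
  constructor
  · intro hp i hmem
    have hi : i < cs.length / 2 := by simpa using hmem
    have hi1 : i < cs.length := by omega
    have heq : cs[i]? = cs[cs.length - 1 - i]? := by
      conv_lhs => rw [hp]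
      exact List.getElem?_reverse hi1
    simp [heq]
  · intro h
    apply List.ext_getElem (by simp)
    intro i h1 h2
    have key : ∀ j, ∀ hj : j < cs.length / 2, cs[j]'(by omega) = cs[cs.length - 1 - j]'(by omega) := by
      intro j hj
      have := h j (by simpa using hj)
      have hj1 : j < cs.length := by omega
      have hj2 : cs.length - 1 - j < cs.length := by omega
      simp [hj1, hj2] at this
      exact this
    rw [List.length_reverse] at h2
    rw [List.getElem_reverse]
    by_cases hlt : i < cs.length / 2
    · exact key i hlt
    · by_cases hgt : cs.length - 1 - i < cs.length / 2
      · have := (key _ hgt).symm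
        convert this using 2
        omega
      · congr 1
        omega

-- ===== A reduces to the canonical form =====
theorem solveA_canon (s : String) : solve s = canonSolve s.toList := by
  unfold solve canonSolve
  simp only [PySem.List.slice?_none_none_neg_one, Option.getD_some, PySem.List.slice_to_natCast]
  generalize s.toList = cs
  by_cases hp : cs = cs.reverse
  · rw [if_pos hp, if_pos ((palindrome_iff_count_zero cs).mp hp)]
    exact decide_eq_decide.mpr (by omega)
  · have hM : mismatchCount cs ≠ 0 := fun h => hp ((palindrome_iff_count_zero cs).mpr h)
    rw [if_neg hp, if_neg hM]
    have hpos : 0 < cs.length / 2 := by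
      rcases cs with _ | ⟨a, t⟩
      · exact absurd rfl hp
      · rcases t with _ | ⟨b, u⟩
        · exact absurd rfl hp
        · simp
    rw [PySem.List.slice_from_neg_natCast cs (cs.length / 2) hpos,
        foldl_indicator, zip_halves_eq_map, countP_pairs_eq]
    by_cases hodd : cs.length % 2 ≠ 0
    · rw [if_pos hodd]
      exact decide_eq_decide.mpr (by omega)
    · rw [if_neg hodd]
      simp

-- ===== B reduces to the canonical form =====

-- the second loop decides "every mirrored pair from index i on matches"
theorem check_iff (cs : List Char) : ∀ (d : Nat) (i j : Int), (j - i).toNat = d → 0 ≤ i →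
    i + j = (cs.length : Int) - 1 →
    (solveAltCheck cs i j = true
      ↔ ∀ k : Nat, i ≤ (k : Int) → k < cs.length / 2 → cs[k]? = cs[cs.length - 1 - k]?) := by
  intro d
  induction d using Nat.strong_induction_on with
  | _ d ih =>
    intro i j hd hi hsum
    rw [solveAltCheck]
    by_cases hij : i < j
    · rw [dif_pos hij]
      have hi' : i.toNat < cs.length := by omega
      have hgi : PySem.List.pyGet? cs i = cs[i.toNat]? := PySem.List.pyGet?_of_nonneg cs hi
      have hgj : PySem.List.pyGet? cs j = cs[j.toNat]? := PySem.List.pyGet?_of_nonneg cs (by omega)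
      have hjn : j.toNat = cs.length - 1 - i.toNat := by omega
      have hlt : i.toNat < cs.length / 2 := by omega
      by_cases hne : PySem.List.pyGet? cs i ≠ PySem.List.pyGet? cs j
      · rw [if_pos hne]
        constructor
        · intro hfalse
          exact absurd hfalse (by simp)
        · intro hall
          exact absurd (by rw [hgi, hgj, hjn]; exact hall i.toNat (by omega) hlt) hne
      · rw [if_neg hne]
        rw [not_not] at hne
        rw [ih (j - 1 - (i + 1)).toNat (by omega) (i + 1) (j - 1) rfl (by omega) (by omega)]
        constructor
        · intro hall k hk1 hk2
          rcases Nat.lt_or_ge i.toNat k with h | h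
          · exact hall k (by omega) hk2
          · have hki : k = i.toNat := by omega
            rw [hki, ← hjn, ← hgi, ← hgj]; exact hne
        · intro hall k hk1 hk2
          exact hall k (by omega) hk2
    · rw [dif_neg hij]
      constructor
      · intro _ k hk1 hk2
        omega
      · intro _
        rfl
-- the first loop: pointers stay mirrored, everything below i' matches,
-- and it stops either with crossed pointers or at a mismatch
theorem scan_props (cs : List Char) : ∀ (d : Nat) (i j : Int), (j - i).toNat = d → 0 ≤ i →
    i + j = (cs.length : Int) - 1 →
    (∀ k : Nat, (k : Int) < i → cs[k]? = cs[cs.length - 1 - k]?) →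
    0 ≤ (solveAltScan cs i j).1 ∧
    (solveAltScan cs i j).1 + (solveAltScan cs i j).2 = (cs.length : Int) - 1 ∧
    (∀ k : Nat, (k : Int) < (solveAltScan cs i j).1 → cs[k]? = cs[cs.length - 1 - k]?) ∧
    ((solveAltScan cs i j).2 ≤ (solveAltScan cs i j).1 ∨
      cs[(solveAltScan cs i j).1.toNat]? ≠ cs[cs.length - 1 - (solveAltScan cs i j).1.toNat]?) := by
  intro d
  induction d using Nat.strong_induction_on with
  | _ d ih =>
    intro i j hd hi hsum hbelow
    rw [solveAltScan]
    by_cases h : i < j ∧ PySem.List.pyGet? cs i = PySem.List.pyGet? cs j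
    · rw [dif_pos h]
      obtain ⟨hij, heq⟩ := h
      have hi' : i.toNat < cs.length := by omega
      have hjn : j.toNat = cs.length - 1 - i.toNat := by omega
      have hmatch : cs[i.toNat]? = cs[cs.length - 1 - i.toNat]? := by
        rw [← hjn, ← PySem.List.pyGet?_of_nonneg cs hi, ← PySem.List.pyGet?_of_nonneg cs (by omega : (0:Int) ≤ j)]
        exact heq
      exact ih (j - 1 - (i + 1)).toNat (by omega) (i + 1) (j - 1) rfl (by omega) (by omega)
        (by
          intro k hk
          rcases Nat.lt_or_ge k i.toNat with hlt | hge
          · exact hbelow k (by omega)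
          · have : k = i.toNat := by omega
            rw [this]; exact hmatch)
    · rw [dif_neg h]
      refine ⟨hi, hsum, hbelow, ?_⟩
      by_cases hij : i < j
      · right
        have heq : PySem.List.pyGet? cs i ≠ PySem.List.pyGet? cs j := fun he => h ⟨hij, he⟩
        have hjn : j.toNat = cs.length - 1 - i.toNat := by omega
        rw [← hjn, ← PySem.List.pyGet?_of_nonneg cs hi, ← PySem.List.pyGet?_of_nonneg cs (by omega : (0:Int) ≤ j)]
        exact heq
      · left; omega

-- exactly one mismatch iff none after the first
theorem count_one_iff (q m : Nat) (P : Nat → Prop) [DecidablePred P] (hm : m < q) (hP : P m)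
    (hbelow : ∀ k, k < m → ¬ P k) :
    ((List.range q).countP (fun k => decide (P k)) = 1 ↔ ∀ k, m + 1 ≤ k → k < q → ¬ P k) := by
  have hq : q = (m + 1) + (q - m - 1) := by omega
  rw [hq, List.range_add, List.countP_append, List.range_succ, List.countP_append]
  have h0 : (List.range m).countP (fun k => decide (P k)) = 0 :=
    List.countP_eq_zero.mpr (by intro k hk; simpa using hbelow k (List.mem_range.mp hk))
  rw [h0, List.countP_singleton, decide_eq_true hP, if_pos rfl, List.countP_map]
  constructor
  · intro h1 k hk1 hk2 hPk
    have hz : (List.range (q - m - 1)).countP ((fun k => decide (P k)) ∘ fun x => m + 1 + x) = 0 := by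
      omega
    have h := List.countP_eq_zero.mp hz (k - (m + 1)) (List.mem_range.mpr (by omega))
    simp only [Function.comp_apply, decide_eq_true_eq] at h
    rw [show k = m + 1 + (k - (m + 1)) by omega] at hPk
    exact h hPk
  · intro hall
    have hz : (List.range (q - m - 1)).countP ((fun k => decide (P k)) ∘ fun x => m + 1 + x) = 0 := by
      apply List.countP_eq_zero.mpr
      intro x hx
      simp only [Function.comp_apply, decide_eq_true_eq]
      exact hall (m + 1 + x) (by omega) (by have := List.mem_range.mp hx; omega)
    omega

theorem solveB_canon (s : String) : solve_alt s = canonSolve s.toList := by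
  unfold solve_alt canonSolve
  generalize s.toList = cs
  have hs := scan_props cs (((cs.length : Int) - 1 - 0).toNat) 0 ((cs.length : Int) - 1) rfl
      (le_refl 0) (by omega) (by intro k hk; omega)
  obtain ⟨h1, h2, h3, h4⟩ := hs
  set i' := (solveAltScan cs 0 ((cs.length : Int) - 1)).1 with hi'
  set j' := (solveAltScan cs 0 ((cs.length : Int) - 1)).2 with hj'
  by_cases hle : j' ≤ i'
  · rw [if_pos hle]
    have hM : mismatchCount cs = 0 := by
      unfold mismatchCount
      apply List.countP_eq_zero.mpr
      intro k hk
      have hk' : k < cs.length / 2 := by simpa using hk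
      have : (k : Int) < i' := by omega
      simpa using h3 k this
    rw [if_pos hM]
  · rw [if_neg hle]
    have hij : i' < j' := by omega
    have hmis : cs[i'.toNat]? ≠ cs[cs.length - 1 - i'.toNat]? := by
      rcases h4 with h | h
      · omega
      · exact h
    set m := i'.toNat with hm
    have hmq : m < cs.length / 2 := by omega
    have hbelow : ∀ k, k < m → ¬ cs[k]? ≠ cs[cs.length - 1 - k]? := by
      intro k hk
      simpa using h3 k (by omega)
    have hM1 : mismatchCount cs ≠ 0 := by
      unfold mismatchCount
      intro hz
      exact hmis (by simpa using List.countP_eq_zero.mp hz m (by simpa using hmq))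
    rw [if_neg hM1]
    rw [Bool.eq_iff_iff,
        check_iff cs ((j' - 1 - (i' + 1)).toNat) (i' + 1) (j' - 1) rfl (by omega) (by omega),
        decide_eq_true_iff]
    rw [show mismatchCount cs = (List.range (cs.length / 2)).countP
          (fun k => decide (cs[k]? ≠ cs[cs.length - 1 - k]?)) from rfl]
    rw [count_one_iff (cs.length / 2) m (fun k => cs[k]? ≠ cs[cs.length - 1 - k]?) hmq hmis hbelow]
    constructor
    · intro hall k hk1 hk2 hP
      exact hP (hall k (by omega) hk2)
    · intro hall k hk1 hk2
      by_contra hne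
      exact hall k (by omega) hk2 hne

-- ===== VERDICT (by name: the statement is the Claim_ definition above) =====
theorem solve_spec : Claim_equal_solve := by
  intro s _
  unfold Spec_solve
  rw [solveA_canon, solveB_canon]
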